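-- pv_equiv track=rewrite | github.com/Degover/advent-of-code-2015 | challenges/day_01.py | part_1_solution_02
-- ===== SOURCE A (Python) =====
-- def part_1_solution_02(input):
--     final_floor = 0
--     for char in input:
--         if(char == "("):
--             final_floor += 1
--         else:
--             final_floor -= 1
--
--     return final_floor
-- ===== SOURCE B (Python) =====
-- def part_1_solution_02(input):
--     # closed form: each '(' adds 1, every other char subtracts 1,
--     # so result = count('(') - (len - count('(')) = 2*count('(') - len
--     return 2 * input.count("(") - len(input)
-- ===== Notes on version B (the rewrite author's own statement) =====
-- stated objective: simpler
-- what changed: Replaces the per-character branching loop by the closed-form arithmetic 2*count('(') - len(input), deriving the decrement count from the total length.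
import Mathlib
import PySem

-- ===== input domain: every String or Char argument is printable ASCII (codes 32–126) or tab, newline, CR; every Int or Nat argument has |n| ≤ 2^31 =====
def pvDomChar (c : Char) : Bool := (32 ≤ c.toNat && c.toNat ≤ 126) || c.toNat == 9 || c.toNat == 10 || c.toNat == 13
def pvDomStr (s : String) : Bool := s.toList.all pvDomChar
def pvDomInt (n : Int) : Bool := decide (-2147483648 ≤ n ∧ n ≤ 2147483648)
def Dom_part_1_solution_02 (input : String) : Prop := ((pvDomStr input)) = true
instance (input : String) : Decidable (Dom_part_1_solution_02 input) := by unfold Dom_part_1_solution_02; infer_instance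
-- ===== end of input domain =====

-- B replaces A's per-character branching loop by the closed form 2*count('(') - len (simpler).


-- ===== PORT A =====
def part_1_solution_02 (input : String) : Int :=
  input.toList.foldl (fun final_floor char =>
    if char == '(' then final_floor + 1 else final_floor - 1) 0

-- ===== PORT B =====
def part_1_solution_02_alt (input : String) : Int :=
  2 * (PySem.Str.count input "(" : Int) - PySem.Str.len input

-- ===== PRECONDITION & SPEC =====
def Spec_part_1_solution_02 (input : String) (out : Int) : Prop := out = part_1_solution_02_alt input
instance (input : String) (out : Int) : Decidable (Spec_part_1_solution_02 input out) := by unfold Spec_part_1_solution_02; infer_instance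

-- ===== CLAIM (what is proved, stated in full; the proofs are below) =====
def Claim_equal_part_1_solution_02 : Prop := ∀ (input : String), Dom_part_1_solution_02 input → Spec_part_1_solution_02 input (part_1_solution_02 input)

-- ===== LEMMAS AND PROOFS =====

-- A's loop in closed form: start + 2*(number of '(') - length.
theorem foldl_floor (s : List Char) (a : Int) :
    s.foldl (fun final_floor char =>
      if char == '(' then final_floor + 1 else final_floor - 1) a
      = a + 2 * (s.count '(' : Int) - s.length := by
  induction s generalizing a with
  | nil => simp
  | cons c t ih =>
    simp only [List.foldl_cons, ih, List.count_cons, List.length_cons]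
    by_cases h : c = '('
    · simp [h]; ring
    · simp [h]; ring

-- Python's substring count with a single-character needle is the character count.
theorem count_go_singleton (c : Char) (s : List Char) (fuel acc : Nat)
    (h : s.length ≤ fuel) :
    PySem.Chars.count.go [c] fuel s acc = acc + s.count c := by
  induction s generalizing fuel acc with
  | nil => cases fuel <;> simp [PySem.Chars.count.go]
  | cons d t ih =>
    cases fuel with
    | zero => simp at h
    | succ n =>
      simp only [List.length_cons, Nat.succ_le_succ_iff] at h
      by_cases hd : d = c
      · simp [PySem.Chars.count.go, hd, List.isPrefixOf, ih n (acc + 1) h]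
        omega
      · simp [PySem.Chars.count.go, List.isPrefixOf, hd, Ne.symm hd,
          ih n acc h]

theorem count_singleton (s : List Char) (c : Char) :
    PySem.Chars.count s [c] = s.count c := by
  simp [PySem.Chars.count, count_go_singleton c s s.length 0 le_rfl]

-- ===== VERDICT (by name: the statement is the Claim_ definition above) =====
theorem part_1_solution_02_spec : Claim_equal_part_1_solution_02 := by
  intro input _
  unfold Spec_part_1_solution_02 part_1_solution_02 part_1_solution_02_alt
  rw [foldl_floor, PySem.Str.count_eq, PySem.Str.len_eq]
  have : ("(" : String).toList = ['('] := rfl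
  rw [this, count_singleton]
  ring
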